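-- pv_equiv track=rewrite | github.com/narula2000/leetcode-archive | problems/2454-largest-local-values-in-a-matrix/solution.py | largestLocal
-- ===== SOURCE A (Python) =====
-- from typing import List
--
-- def largestLocal(grid: List[List[int]]) -> List[List[int]]:
--     res = []
--     for i in range(1, len(grid)-1):
--         tmp = []
--         for j in range(1, len(grid)-1):
--             _max = 0
--             for k in range(i - 1, i + 2):
--                 for l in range(j - 1, j + 2):
--                     _max = max(_max, grid[k][l])
--             tmp.append(_max)
--         res.append(tmp)
--     return res
-- ===== SOURCE B (Python) =====
-- from typing import List
--
-- def largestLocal(grid: List[List[int]]) -> List[List[int]]: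
--     n = len(grid)
--     # horizontal pass: H[i][j-1] = max of grid[i][j-1..j+1], for every row
--     H = [[max(row[j - 1], row[j], row[j + 1]) for j in range(1, n - 1)] for row in grid]
--     # vertical pass + the final clamp at 0 (A starts its running max at 0)
--     return [[max(0, H[i - 1][j], H[i][j], H[i + 1][j]) for j in range(n - 2)]
--             for i in range(1, n - 1)]
-- ===== Notes on version B (the rewrite author's own statement) =====
-- stated objective: faster
-- what changed: Replaces the 9-cell scan per output cell by two separable passes (a horizontal 3-max table over every row, then a vertical 3-max over it with the final clamp at 0), cutting the work per cell from 9 reads in a 4-deep interpreted loop nest to 6 max arguments in flat comprehensions.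
import Mathlib
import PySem

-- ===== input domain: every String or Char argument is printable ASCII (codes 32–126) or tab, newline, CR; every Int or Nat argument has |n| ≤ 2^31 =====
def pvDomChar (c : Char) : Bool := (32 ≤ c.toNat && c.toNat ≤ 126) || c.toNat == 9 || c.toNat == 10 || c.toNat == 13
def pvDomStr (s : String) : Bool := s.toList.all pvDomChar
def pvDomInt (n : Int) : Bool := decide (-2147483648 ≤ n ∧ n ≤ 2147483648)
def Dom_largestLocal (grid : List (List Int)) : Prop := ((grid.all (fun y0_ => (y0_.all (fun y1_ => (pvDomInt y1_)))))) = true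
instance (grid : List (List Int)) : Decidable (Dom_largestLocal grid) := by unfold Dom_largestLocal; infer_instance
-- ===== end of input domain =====

-- B computes the same 3x3-window maxima by two separable passes (horizontal 3-max table, then
-- vertical 3-max with A's clamp at 0) instead of scanning all 9 cells per output cell.


-- ===== PORT A =====
def largestLocal (grid : List (List Int)) : List (List Int) :=
  let n : Int := grid.length
  (PySem.List.pyRange 1 (n - 1) 1).foldl (fun res i =>
    res ++ [(PySem.List.pyRange 1 (n - 1) 1).foldl (fun tmp j =>
      tmp ++ [(PySem.List.pyRange (i - 1) (i + 2) 1).foldl (fun m k =>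
        (PySem.List.pyRange (j - 1) (j + 2) 1).foldl (fun m l =>
          max m (PySem.List.pyGetD (PySem.List.pyGetD grid k []) l 0)) m) 0]) []]) []

-- ===== PORT B =====
def largestLocal_alt (grid : List (List Int)) : List (List Int) :=
  let n : Int := grid.length
  let H : List (List Int) := grid.map (fun row =>
    (PySem.List.pyRange 1 (n - 1) 1).map (fun j =>
      max (PySem.List.pyGetD row (j - 1) 0)
        (max (PySem.List.pyGetD row j 0) (PySem.List.pyGetD row (j + 1) 0))))
  (PySem.List.pyRange 1 (n - 1) 1).map (fun i =>
    (PySem.List.pyRange 0 (n - 2) 1).map (fun j =>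
      max 0 (max (PySem.List.pyGetD (PySem.List.pyGetD H (i - 1) []) j 0)
        (max (PySem.List.pyGetD (PySem.List.pyGetD H i []) j 0)
          (PySem.List.pyGetD (PySem.List.pyGetD H (i + 1) []) j 0)))))

-- ===== PRECONDITION & SPEC =====
-- Pre_ excludes exactly the inputs where the Python A raises IndexError: a grid with at least
-- 3 rows in which some row is shorter than the number of rows (the 3x3 scan reads column n-1).
def Pre_largestLocal (grid : List (List Int)) : Prop :=
  grid.length ≤ 2 ∨ ∀ row ∈ grid, grid.length ≤ row.length
instance (grid : List (List Int)) : Decidable (Pre_largestLocal grid) := by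
  unfold Pre_largestLocal; infer_instance

def pvWitness_largestLocal : List (List Int) := [[9, 9, 8], [1, 1, 1], [8, 9, 9]]

def Spec_largestLocal (grid : List (List Int)) (out : List (List Int)) : Prop := out = largestLocal_alt grid
instance (grid : List (List Int)) (out : List (List Int)) : Decidable (Spec_largestLocal grid out) := by unfold Spec_largestLocal; infer_instance

-- ===== CLAIM (what is proved, stated in full; the proofs are below) =====
def Claim_equal_largestLocal : Prop := ∀ (grid : List (List Int)), Dom_largestLocal grid → Pre_largestLocal grid → Spec_largestLocal grid (largestLocal grid)

-- ===== LEMMAS AND PROOFS =====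

-- range(a-1, a+2) is the three-element window
theorem pyRange_three (a : Int) : PySem.List.pyRange (a - 1) (a + 2) = [a - 1, a, a + 1] := by
  rw [PySem.List.pyRange_one_cons (by omega), PySem.List.pyRange_one_cons (by omega),
    PySem.List.pyRange_one_cons (by omega), PySem.List.pyRange_one_eq_nil (by omega)]
  norm_num

theorem max9 (a b c d e f g h i : Int) :
    max (max (max (max (max (max (max (max (max 0 a) b) c) d) e) f) g) h) i
    = max 0 (max (max a (max b c)) (max (max d (max e f)) (max g (max h i)))) := by
  ac_rfl

-- A's left-nested running max of the 9 cells equals B's clamp of the three 3-maxes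
-- (both ports agree on EVERY input; the claim below is its restriction to Dom/Pre_)
theorem largestLocal_eq_alt (grid : List (List Int)) :
    largestLocal grid = largestLocal_alt grid := by
  unfold largestLocal largestLocal_alt
  simp only [PySem.List.foldl_append_singleton_eq_map, List.nil_append]
  apply List.map_congr_left
  intro i hi
  rw [PySem.List.mem_pyRange_one] at hi
  apply List.ext_getElem
  · simp [PySem.List.length_pyRange_one]; omega
  · intro k h1 h2
    simp only [List.getElem_map, PySem.List.getElem_pyRange_one]
    rw [List.length_map, PySem.List.length_pyRange_one] at h1
    have hkn : (k : Int) < (grid.length : Int) - 2 := by omega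
    have hn3 : (3:Int) ≤ grid.length := by omega
    rw [pyRange_three i]
    rw [pyRange_three (1 + (k:Int))]
    simp only [List.foldl_cons, List.foldl_nil]
    rw [PySem.List.pyGetD_eq_getElem grid [] (show (0:Int) ≤ i - 1 by omega) (by omega),
        PySem.List.pyGetD_eq_getElem grid [] (show (0:Int) ≤ i by omega) (by omega),
        PySem.List.pyGetD_eq_getElem grid [] (show (0:Int) ≤ i + 1 by omega) (by omega)]
    rw [PySem.List.pyGetD_eq_getElem (List.map _ grid) [] (show (0:Int) ≤ i - 1 by omega) (by simp; omega),
        PySem.List.pyGetD_eq_getElem (List.map _ grid) [] (show (0:Int) ≤ i by omega) (by simp; omega),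
        PySem.List.pyGetD_eq_getElem (List.map _ grid) [] (show (0:Int) ≤ i + 1 by omega) (by simp; omega)]
    simp only [List.getElem_map, zero_add]
    rw [PySem.List.pyGetD_map_pyRange_one _ 1 _ k 0 (by omega),
        PySem.List.pyGetD_map_pyRange_one _ 1 _ k 0 (by omega),
        PySem.List.pyGetD_map_pyRange_one _ 1 _ k 0 (by omega)]
    exact max9 _ _ _ _ _ _ _ _ _

-- ===== VERDICT (by name: the statement is the Claim_ definition above) =====
theorem largestLocal_spec : Claim_equal_largestLocal := by
  intro grid _ _
  exact largestLocal_eq_alt grid
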